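-- pv_equiv track=rewrite | github.com/Katy-Bejar/Visualizator | estructura/estructura_secundaria.py | compute_energy_matrix
-- ===== SOURCE A (Python) =====
-- def compute_energy_matrix(sequence, alpha):
--     length = len(sequence)
--     energy_matrix = [[0] * length for _ in range(length)]
--
--     for gap in range(1, length):
--         for i in range(length - gap):
--             j = i + gap
--             min_energy = float('inf')
--             min_energy = min(min_energy, energy_matrix[i + 1][j])
--             min_energy = min(min_energy, energy_matrix[i][j - 1])
--             if sequence[i] + sequence[j] in alpha:
--                 min_energy = min(min_energy, energy_matrix[i + 1][j - 1] + alpha[sequence[i] + sequence[j]])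
--             for k in range(i + 1, j):
--                 min_energy = min(min_energy, energy_matrix[i][k - 1] + energy_matrix[k][j])
--
--             energy_matrix[i][j] = min_energy
--
--     return energy_matrix
-- ===== SOURCE B (Python) =====
-- def compute_energy_matrix(sequence, alpha):
--     n = len(sequence)
--     memo = {}
--
--     def solve(i, j):
--         if j <= i:
--             return 0
--         if (i, j) in memo:
--             return memo[(i, j)]
--         best = solve(i + 1, j)
--         best = min(best, solve(i, j - 1))
--         pair = sequence[i] + sequence[j]
--         if pair in alpha:
--             best = min(best, solve(i + 1, j - 1) + alpha[pair])
--         for k in range(i + 1, j):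
--             best = min(best, solve(i, k - 1) + solve(k, j))
--         memo[(i, j)] = best
--         return best
--
--     # warm the cache in increasing-gap order (keeps recursion depth O(1))
--     for i in range(n - 1, -1, -1):
--         for j in range(i + 1, n):
--             solve(i, j)
--     return [[solve(i, j) for j in range(n)] for i in range(n)]
-- ===== Notes on version B (the rewrite author's own statement) =====
-- stated objective: alternative
-- what changed: A fills a preallocated mutable n x n matrix bottom-up in gap (anti-diagonal) order; B replaces this with a top-down memoized recursion solve(i,j) caching results in a dict, warmed in increasing-gap order, and builds the matrix from solve's values.
import Mathlib
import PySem

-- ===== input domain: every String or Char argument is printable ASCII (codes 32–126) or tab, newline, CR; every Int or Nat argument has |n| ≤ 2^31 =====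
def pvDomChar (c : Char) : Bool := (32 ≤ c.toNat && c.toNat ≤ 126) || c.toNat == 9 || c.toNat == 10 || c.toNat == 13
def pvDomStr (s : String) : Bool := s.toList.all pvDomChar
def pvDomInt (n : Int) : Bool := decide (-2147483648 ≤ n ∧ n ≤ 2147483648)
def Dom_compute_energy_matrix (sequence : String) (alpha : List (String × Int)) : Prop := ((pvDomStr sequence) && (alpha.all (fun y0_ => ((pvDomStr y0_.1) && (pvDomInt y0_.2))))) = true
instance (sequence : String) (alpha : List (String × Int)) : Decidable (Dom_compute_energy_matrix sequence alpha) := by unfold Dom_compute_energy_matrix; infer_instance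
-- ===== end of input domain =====

-- B replaces A's bottom-up gap-by-gap tabulation over a preallocated mutable n×n matrix by a
-- top-down memoized recursion solve(i,j) cached in a dict (alternative decomposition, same O(n^3) cost).

-- shared primitives: matrix read/write and the dict lookup `key in alpha` / `alpha[key]` (first match)
def pvMget (m : List (List Int)) (i j : Nat) : Int := (m.getD i []).getD j 0
def pvMset (m : List (List Int)) (i j : Nat) (v : Int) : List (List Int) :=
  m.set i ((m.getD i []).set j v)
def pvLookup (alpha : List (String × Int)) (k : String) : Option Int :=
  (alpha.find? (fun p => p.1 == k)).map (·.2)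

-- ===== PORT A =====
-- literal port of A; `min(float('inf'), x)` on the first candidate is just `x` (ints stay below inf)
def compute_energy_matrix (sequence : String) (alpha : List (String × Int)) : List (List Int) :=
  let chars := sequence.toList
  let n := chars.length
  let init : List (List Int) := (List.range n).map (fun _ => List.replicate n (0 : Int))
  (List.range' 1 (n - 1)).foldl (fun m gap =>
    (List.range (n - gap)).foldl (fun m i =>
      let j := i + gap
      let e1 := pvMget m (i + 1) j
      let e2 := min e1 (pvMget m i (j - 1))
      let e3 :=
        match pvLookup alpha (String.ofList [chars.getD i ' ', chars.getD j ' ']) with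
        | some v => min e2 (pvMget m (i + 1) (j - 1) + v)
        | none => e2
      let e4 := (List.range' (i + 1) (j - (i + 1))).foldl
        (fun b k => min b (pvMget m i (k - 1) + pvMget m k j)) e3
      pvMset m i j e4) m) init

-- ===== PORT B =====
-- solve(i, j): memoized minimum energy; threads the memo dict (Python's mutable closure dict).
-- The fuel argument is only a totality guard (every recursive call shrinks the gap j - i, so any
-- fuel ≥ j - i gives Python's value); the inner foldl is Python's `for k in range(i+1, j)` loop.
def pvSolve (chars : List Char) (alpha : List (String × Int)) :
    Nat → Nat → Nat → PySem.Dict (Nat × Nat) Int → Int × PySem.Dict (Nat × Nat) Int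
  | 0, _, _, memo => (0, memo)
  | fuel + 1, i, j, memo =>
    if j ≤ i then (0, memo)
    else
      match memo.get? (i, j) with
      | some v => (v, memo)
      | none =>
        let p1 := pvSolve chars alpha fuel (i + 1) j memo
        let p2 := pvSolve chars alpha fuel i (j - 1) p1.2
        let b1 := min p1.1 p2.1
        let q :=
          match pvLookup alpha (String.ofList [chars.getD i ' ', chars.getD j ' ']) with
          | some v =>
            let p3 := pvSolve chars alpha fuel (i + 1) (j - 1) p2.2
            (min b1 (p3.1 + v), p3.2)
          | none => (b1, p2.2)
        let r := (List.range' (i + 1) (j - (i + 1))).foldl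
          (fun (acc : Int × PySem.Dict (Nat × Nat) Int) k =>
            let a1 := pvSolve chars alpha fuel i (k - 1) acc.2
            let a2 := pvSolve chars alpha fuel k j a1.2
            (min acc.1 (a1.1 + a2.1), a2.2)) q
        (r.1, r.2.insert (i, j) r.1)

def compute_energy_matrix_alt (sequence : String) (alpha : List (String × Int)) : List (List Int) :=
  let chars := sequence.toList
  let n := chars.length
  -- warm the cache in increasing-gap order (keeps Python's recursion depth O(1))
  let memo0 := (List.range n).foldl (fun m ii =>
      (List.range' ((n - 1 - ii) + 1) (n - ((n - 1 - ii) + 1))).foldl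
        (fun m j => (pvSolve chars alpha (j - (n - 1 - ii)) (n - 1 - ii) j m).2) m)
    PySem.Dict.empty
  ((List.range n).foldl (fun (acc : List (List Int) × PySem.Dict (Nat × Nat) Int) i =>
      let rw := (List.range n).foldl (fun (racc : List Int × PySem.Dict (Nat × Nat) Int) j =>
          let p := pvSolve chars alpha (j - i) i j racc.2
          (racc.1 ++ [p.1], p.2)) ([], acc.2)
      (acc.1 ++ [rw.1], rw.2)) ([], memo0)).1

-- ===== PRECONDITION & SPEC =====
def Spec_compute_energy_matrix (sequence : String) (alpha : List (String × Int)) (out : List (List Int)) : Prop := out = compute_energy_matrix_alt sequence alpha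
instance (sequence : String) (alpha : List (String × Int)) (out : List (List Int)) : Decidable (Spec_compute_energy_matrix sequence alpha out) := by unfold Spec_compute_energy_matrix; infer_instance

-- ===== CLAIM (what is proved, stated in full; the proofs are below) =====
def Claim_equal_compute_energy_matrix : Prop := ∀ (sequence : String) (alpha : List (String × Int)), Dom_compute_energy_matrix sequence alpha → Spec_compute_energy_matrix sequence alpha (compute_energy_matrix sequence alpha)

-- ===== LEMMAS AND PROOFS =====

-- the common mathematical recurrence, with fuel (every recursive call shrinks the gap j - i)
def pvE (chars : List Char) (alpha : List (String × Int)) : Nat → Nat → Nat → Int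
  | 0, _, _ => 0
  | f + 1, i, j =>
    if j ≤ i then 0
    else
      let e2 := min (pvE chars alpha f (i + 1) j) (pvE chars alpha f i (j - 1))
      let e3 :=
        match pvLookup alpha (String.ofList [chars.getD i ' ', chars.getD j ' ']) with
        | some v => min e2 (pvE chars alpha f (i + 1) (j - 1) + v)
        | none => e2
      (List.range' (i + 1) (j - (i + 1))).foldl
        (fun b k => min b (pvE chars alpha f i (k - 1) + pvE chars alpha f k j)) e3

def pvEn (chars : List Char) (alpha : List (String × Int)) (i j : Nat) : Int :=
  pvE chars alpha (j - i) i j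

theorem pvEn_of_le (chars : List Char) (alpha : List (String × Int)) {i j : Nat} (h : j ≤ i) :
    pvEn chars alpha i j = 0 := by
  simp [pvEn, Nat.sub_eq_zero_of_le h, pvE]

theorem pvE_fuel (chars : List Char) (alpha : List (String × Int)) :
    ∀ f i j, j - i ≤ f → pvE chars alpha f i j = pvEn chars alpha i j := by
  intro f
  induction f using Nat.strong_induction_on with
  | _ f IH =>
  intro i j h
  by_cases hij : j ≤ i
  · have h0 : j - i = 0 := by omega
    cases f with
    | zero => simp [pvE, pvEn, h0]
    | succ f' => simp [pvE, pvEn, h0, hij]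
  · obtain ⟨f', rfl⟩ : ∃ f', f = f' + 1 := ⟨f - 1, by omega⟩
    have hg : j - i = (j - i - 1) + 1 := by omega
    show pvE chars alpha (f' + 1) i j = pvEn chars alpha i j
    rw [pvEn, hg]
    have key : ∀ i' j', j' - i' < j - i →
        pvE chars alpha f' i' j' = pvE chars alpha (j - i - 1) i' j' := by
      intro i' j' hlt
      rw [IH f' (by omega) _ _ (by omega), IH (j - i - 1) (by omega) _ _ (by omega)]
    simp only [pvE, if_neg hij]
    simp only [key (i + 1) j (by omega), key i (j - 1) (by omega),
      key (i + 1) (j - 1) (by omega)]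
    apply PySem.List.foldl_congr_mem
    intro acc k hk
    rw [List.mem_range'_1] at hk
    rw [key i (k - 1) (by omega), key k j (by omega)]

-- the one-step characterization of the recurrence (i < j)
theorem pvEn_eq (chars : List Char) (alpha : List (String × Int)) (i j : Nat) (hij : i < j) :
    pvEn chars alpha i j =
      (List.range' (i + 1) (j - (i + 1))).foldl
        (fun b k => min b (pvEn chars alpha i (k - 1) + pvEn chars alpha k j))
        (match pvLookup alpha (String.ofList [chars.getD i ' ', chars.getD j ' ']) with
         | some v => min (min (pvEn chars alpha (i + 1) j) (pvEn chars alpha i (j - 1)))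
             (pvEn chars alpha (i + 1) (j - 1) + v)
         | none => min (pvEn chars alpha (i + 1) j) (pvEn chars alpha i (j - 1))) := by
  conv_lhs => rw [pvEn, show j - i = (j - i - 1) + 1 from by omega]
  simp only [pvE, if_neg (by omega : ¬ j ≤ i)]
  simp only [pvE_fuel chars alpha (j - i - 1) (i + 1) j (by omega),
    pvE_fuel chars alpha (j - i - 1) i (j - 1) (by omega),
    pvE_fuel chars alpha (j - i - 1) (i + 1) (j - 1) (by omega)]
  apply PySem.List.foldl_congr_mem
  intro acc k hk
  rw [List.mem_range'_1] at hk
  rw [pvE_fuel chars alpha (j - i - 1) i (k - 1) (by omega),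
    pvE_fuel chars alpha (j - i - 1) k j (by omega)]

-- the target matrix both ports compute
def pvT (chars : List Char) (alpha : List (String × Int)) : List (List Int) :=
  (List.range chars.length).map (fun i =>
    (List.range chars.length).map (fun j => pvEn chars alpha i j))

-- ---------- side A ----------

def pvStepI (chars : List Char) (alpha : List (String × Int)) (gap : Nat)
    (m : List (List Int)) (i : Nat) : List (List Int) :=
  let j := i + gap
  let e1 := pvMget m (i + 1) j
  let e2 := min e1 (pvMget m i (j - 1))
  let e3 :=
    match pvLookup alpha (String.ofList [chars.getD i ' ', chars.getD j ' ']) with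
    | some v => min e2 (pvMget m (i + 1) (j - 1) + v)
    | none => e2
  let e4 := (List.range' (i + 1) (j - (i + 1))).foldl
    (fun b k => min b (pvMget m i (k - 1) + pvMget m k j)) e3
  pvMset m i j e4

def pvStepG (chars : List Char) (alpha : List (String × Int)) (n : Nat)
    (m : List (List Int)) (gap : Nat) : List (List Int) :=
  (List.range (n - gap)).foldl (pvStepI chars alpha gap) m

theorem portA_unfold (sequence : String) (alpha : List (String × Int)) :
    compute_energy_matrix sequence alpha =
      (List.range' 1 (sequence.toList.length - 1)).foldl
        (pvStepG sequence.toList alpha sequence.toList.length)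
        ((List.range sequence.toList.length).map
          (fun _ => List.replicate sequence.toList.length (0 : Int))) := rfl

def pvShape (n : Nat) (m : List (List Int)) : Prop :=
  m.length = n ∧ ∀ r ∈ m, r.length = n

theorem pvShape_row {n : Nat} {m : List (List Int)} {i : Nat} (h : pvShape n m) (hi : i < n) :
    (m.getD i []).length = n := by
  rw [List.getD_eq_getElem m [] (h.1 ▸ hi)]
  exact h.2 _ (List.getElem_mem _)

theorem pvShape_mset {n : Nat} {m : List (List Int)} {i j : Nat} {v : Int}
    (h : pvShape n m) (hi : i < n) : pvShape n (pvMset m i j v) := by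
  constructor
  · simp [pvMset, h.1]
  · intro r hr
    rcases List.mem_or_eq_of_mem_set hr with hr | rfl
    · exact h.2 _ hr
    · rw [List.length_set]; exact pvShape_row h hi

theorem pvMget_mset_self {m : List (List Int)} {i j : Nat} {v : Int}
    (hi : i < m.length) (hj : j < (m.getD i []).length) :
    pvMget (pvMset m i j v) i j = v := by
  unfold pvMget pvMset
  have hj' : j < m[i].length := by rwa [List.getD_eq_getElem _ _ hi] at hj
  simp [List.getD_eq_getElem?_getD, hi,
    List.getElem?_eq_getElem (by simpa using hj' : j < (m[i].set j v).length)]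

theorem pvMget_mset_ne {m : List (List Int)} {i j i' j' : Nat} {v : Int}
    (hne : i' ≠ i ∨ j' ≠ j) :
    pvMget (pvMset m i j v) i' j' = pvMget m i' j' := by
  unfold pvMget pvMset
  by_cases hii : i' = i
  · subst hii
    have hj' : j' ≠ j := hne.resolve_left (by simp)
    by_cases hi : i' < m.length
    · simp [List.getD_eq_getElem?_getD, hi, List.getElem?_set_ne (fun hc => hj' hc.symm)]
    · rw [List.set_eq_of_length_le (by omega)]
  · simp [List.getD_eq_getElem?_getD, List.getElem?_set_ne (fun hc => hii hc.symm)]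

def pvInvA (chars : List Char) (alpha : List (String × Int)) (n g t : Nat)
    (m : List (List Int)) : Prop :=
  pvShape n m ∧ ∀ i j, i < n → j < n →
    pvMget m i j =
      if i < j ∧ (j - i < g ∨ (j - i = g ∧ i < t)) then pvEn chars alpha i j else 0

theorem pvInvA_read {chars : List Char} {alpha : List (String × Int)} {n g t : Nat}
    {m : List (List Int)} (h : pvInvA chars alpha n g t m) {i j : Nat}
    (hi : i < n) (hj : j < n) (hg : j - i < g) :
    pvMget m i j = pvEn chars alpha i j := by
  rw [h.2 i j hi hj]
  by_cases hij : i < j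
  · rw [if_pos ⟨hij, Or.inl hg⟩]
  · rw [if_neg (fun hc => hij hc.1), pvEn_of_le chars alpha (by omega)]

theorem pvStepI_inv {chars : List Char} {alpha : List (String × Int)} {n g t : Nat}
    {m : List (List Int)} (hg : 1 ≤ g) (ht : t + g < n)
    (h : pvInvA chars alpha n g t m) :
    pvInvA chars alpha n g (t + 1) (pvStepI chars alpha g m t) := by
  have hval : pvStepI chars alpha g m t = pvMset m t (t + g) (pvEn chars alpha t (t + g)) := by
    unfold pvStepI
    simp only [pvInvA_read h (by omega) (by omega) (by omega : t + g - (t + 1) < g),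
      pvInvA_read h (by omega) (by omega) (by omega : t + g - 1 - t < g),
      pvInvA_read h (by omega) (by omega) (by omega : t + g - 1 - (t + 1) < g)]
    rw [pvEn_eq chars alpha t (t + g) (by omega)]
    congr 1
    apply PySem.List.foldl_congr_mem
    intro acc k hk
    rw [List.mem_range'_1] at hk
    rw [pvInvA_read h (by omega) (by omega) (by omega : k - 1 - t < g),
      pvInvA_read h (by omega) (by omega) (by omega : t + g - k < g)]
  rw [hval]
  refine ⟨pvShape_mset h.1 (by omega), ?_⟩
  intro i' j' hi' hj'
  by_cases hc : i' = t ∧ j' = t + g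
  · obtain ⟨rfl, rfl⟩ := hc
    rw [pvMget_mset_self (by rw [h.1.1]; omega) (by rw [pvShape_row h.1 (by omega)]; omega)]
    rw [if_pos ⟨by omega, Or.inr ⟨by omega, by omega⟩⟩]
  · rw [pvMget_mset_ne (by tauto), h.2 i' j' hi' hj']
    have hiff : (i' < j' ∧ (j' - i' < g ∨ (j' - i' = g ∧ i' < t))) ↔
        (i' < j' ∧ (j' - i' < g ∨ (j' - i' = g ∧ i' < t + 1))) := by
      by_cases hit : i' = t
      · subst hit
        have : j' ≠ i' + g := fun hc' => hc ⟨rfl, by omega⟩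
        constructor <;> rintro ⟨h1, h2⟩ <;> exact ⟨h1, by omega⟩
      · constructor <;> rintro ⟨h1, h2⟩ <;> exact ⟨h1, by omega⟩
    rw [if_congr hiff rfl rfl]

theorem pvStepG_inner (chars : List Char) (alpha : List (String × Int)) {n g : Nat}
    (hg : 1 ≤ g) : ∀ t, t ≤ n - g → ∀ m, pvInvA chars alpha n g 0 m →
    pvInvA chars alpha n g t ((List.range t).foldl (pvStepI chars alpha g) m) := by
  intro t
  induction t with
  | zero => intro _ m hm; simpa using hm
  | succ t IH =>
    intro ht m hm
    rw [List.range_succ, List.foldl_append, List.foldl_cons, List.foldl_nil]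
    exact pvStepI_inv hg (by omega) (IH (by omega) m hm)

theorem pvInvA_start {chars : List Char} {alpha : List (String × Int)} {n g : Nat}
    {m : List (List Int)} (h : pvInvA chars alpha n g (n - g) m) (hgn : g ≤ n) :
    pvInvA chars alpha n (g + 1) 0 m := by
  refine ⟨h.1, ?_⟩
  intro i j hi hj
  rw [h.2 i j hi hj]
  refine if_congr ?_ rfl rfl
  constructor <;> rintro ⟨h1, h2⟩ <;> exact ⟨h1, by omega⟩

theorem pvInit_inv (chars : List Char) (alpha : List (String × Int)) (n : Nat) :
    pvInvA chars alpha n 1 0 ((List.range n).map (fun _ => List.replicate n (0 : Int))) := by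
  refine ⟨⟨by simp, ?_⟩, ?_⟩
  · intro r hr
    simp only [List.mem_map] at hr
    obtain ⟨_, _, rfl⟩ := hr
    simp
  · intro i j hi hj
    rw [if_neg (by rintro ⟨h1, h2⟩; omega)]
    unfold pvMget
    simp [List.getD_eq_getElem?_getD, hi, hj]

theorem pvOuter (chars : List Char) (alpha : List (String × Int)) {n : Nat} :
    ∀ c, c ≤ n - 1 → ∀ m, pvInvA chars alpha n 1 0 m →
    pvInvA chars alpha n (c + 1) 0 ((List.range' 1 c).foldl (pvStepG chars alpha n) m) := by
  intro c
  induction c with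
  | zero => intro _ m hm; simpa using hm
  | succ c IH =>
    intro hc m hm
    rw [show List.range' 1 (c + 1) = List.range' 1 c ++ [1 + c] from by
      simpa using List.range'_concat (s := 1) (n := c) (step := 1),
      List.foldl_append, List.foldl_cons, List.foldl_nil,
      show 1 + c = c + 1 from by omega]
    unfold pvStepG
    exact pvInvA_start
      (pvStepG_inner chars alpha (by omega) (n - (c + 1)) le_rfl _ (IH (by omega) m hm))
      (by omega)

theorem portA_eq_T (sequence : String) (alpha : List (String × Int)) :
    compute_energy_matrix sequence alpha = pvT sequence.toList alpha := by
  rw [portA_unfold]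
  have hfin := pvOuter sequence.toList alpha (n := sequence.toList.length)
    (sequence.toList.length - 1) le_rfl _ (pvInit_inv sequence.toList alpha _)
  set n := sequence.toList.length with hn
  set M := (List.range' 1 (n - 1)).foldl (pvStepG sequence.toList alpha n)
    ((List.range n).map (fun _ => List.replicate n (0 : Int))) with hM
  apply List.ext_getElem
  · rw [hfin.1.1]; simp [pvT]; rw [hn]; simp
  · intro i h1 h2
    have hi : i < n := by rw [← hfin.1.1]; exact h1
    apply List.ext_getElem
    · have := pvShape_row hfin.1 hi
      rw [List.getD_eq_getElem M [] h1] at this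
      rw [this]
      simp [pvT, List.getElem_map, hn]
    · intro j h3 h4
      have hj : j < n := by
        have := pvShape_row hfin.1 hi
        rw [List.getD_eq_getElem M [] h1] at this
        omega
      have hget : M[i][j] = pvMget M i j := by
        unfold pvMget
        rw [List.getD_eq_getElem M [] h1, List.getD_eq_getElem _ _ h3]
      rw [hget, hfin.2 i j hi hj]
      have hT : (pvT sequence.toList alpha)[i][j]'h4 = pvEn sequence.toList alpha i j := by
        simp [pvT]
      rw [hT]
      by_cases hij : i < j
      · rw [if_pos ⟨hij, by omega⟩]
      · rw [if_neg (fun hc => hij hc.1), pvEn_of_le sequence.toList alpha (by omega)]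

-- ---------- side B ----------

def pvInvM (chars : List Char) (alpha : List (String × Int))
    (memo : PySem.Dict (Nat × Nat) Int) : Prop :=
  ∀ p v, memo.get? p = some v → v = pvEn chars alpha p.1 p.2

theorem pvSolve_spec (chars : List Char) (alpha : List (String × Int)) :
    ∀ f i j memo, j - i ≤ f → pvInvM chars alpha memo →
    (pvSolve chars alpha f i j memo).1 = pvEn chars alpha i j ∧
    pvInvM chars alpha (pvSolve chars alpha f i j memo).2 := by
  intro f
  induction f with
  | zero =>
    intro i j memo h hm
    exact ⟨(pvEn_of_le chars alpha (by omega)).symm, hm⟩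
  | succ f IH =>
    intro i j memo h hm
    by_cases hij : j ≤ i
    · rw [pvSolve, if_pos hij]
      exact ⟨(pvEn_of_le chars alpha hij).symm, hm⟩
    · rw [pvSolve, if_neg hij]
      cases hg : memo.get? (i, j) with
      | some v => exact ⟨hm (i, j) v hg, hm⟩
      | none =>
        dsimp only
        obtain ⟨v1, m1⟩ := IH (i + 1) j memo (by omega) hm
        obtain ⟨v2, m2⟩ := IH i (j - 1) _ (by omega) m1
        have hfold : ∀ (l : List Nat), (∀ k ∈ l, i < k ∧ k < j) →
            ∀ (b : Int) (memo' : PySem.Dict (Nat × Nat) Int), pvInvM chars alpha memo' →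
            ((l.foldl (fun (acc : Int × PySem.Dict (Nat × Nat) Int) k =>
                let a1 := pvSolve chars alpha f i (k - 1) acc.2
                let a2 := pvSolve chars alpha f k j a1.2
                (min acc.1 (a1.1 + a2.1), a2.2)) (b, memo')).1 =
              l.foldl (fun b kk => min b (pvEn chars alpha i (kk - 1) + pvEn chars alpha kk j)) b) ∧
            pvInvM chars alpha ((l.foldl (fun (acc : Int × PySem.Dict (Nat × Nat) Int) k =>
                let a1 := pvSolve chars alpha f i (k - 1) acc.2
                let a2 := pvSolve chars alpha f k j a1.2
                (min acc.1 (a1.1 + a2.1), a2.2)) (b, memo')).2) := by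
          intro l
          induction l with
          | nil => exact fun _ b memo' hm' => ⟨rfl, hm'⟩
          | cons x xs IHl =>
            intro hmem b memo' hm'
            have hx := hmem x (List.mem_cons_self ..)
            obtain ⟨ha1, hb1⟩ := IH i (x - 1) memo' (by omega) hm'
            obtain ⟨ha2, hb2⟩ := IH x j _ (by omega) hb1
            simp only [List.foldl_cons]
            have hrest := IHl (fun k hk => hmem k (List.mem_cons_of_mem _ hk))
              (min b ((pvSolve chars alpha f i (x - 1) memo').1 +
                (pvSolve chars alpha f x j (pvSolve chars alpha f i (x - 1) memo').2).1))
              (pvSolve chars alpha f x j (pvSolve chars alpha f i (x - 1) memo').2).2 hb2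
            refine ⟨?_, hrest.2⟩
            rw [hrest.1, ha1, ha2]
        cases hl : pvLookup alpha (String.ofList [chars.getD i ' ', chars.getD j ' ']) with
        | some w =>
          dsimp only
          obtain ⟨v3, m3⟩ := IH (i + 1) (j - 1) _ (by omega) m2
          obtain ⟨kv, km⟩ := hfold (List.range' (i + 1) (j - (i + 1)))
            (by intro k hk; rw [List.mem_range'_1] at hk; omega)
            (min (min (pvSolve chars alpha f (i + 1) j memo).1
                (pvSolve chars alpha f i (j - 1) (pvSolve chars alpha f (i + 1) j memo).2).1)
              ((pvSolve chars alpha f (i + 1) (j - 1)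
                (pvSolve chars alpha f i (j - 1) (pvSolve chars alpha f (i + 1) j memo).2).2).1 + w))
            (pvSolve chars alpha f (i + 1) (j - 1)
              (pvSolve chars alpha f i (j - 1) (pvSolve chars alpha f (i + 1) j memo).2).2).2 m3
          have hE := pvEn_eq chars alpha i j (by omega)
          simp only [hl] at hE
          have hinit := hE.symm
          rw [← v1, ← v2, ← v3] at hinit
          have hval' := kv.trans hinit
          refine ⟨hval', ?_⟩
          intro p v hv
          rw [PySem.Dict.get?_insert] at hv
          by_cases hp : p = (i, j)
          · rw [if_pos hp] at hv
            injection hv with hv'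
            subst hp
            exact hv'.symm.trans hval'
          · rw [if_neg hp] at hv
            exact km p v hv
        | none =>
          dsimp only
          obtain ⟨kv, km⟩ := hfold (List.range' (i + 1) (j - (i + 1)))
            (by intro k hk; rw [List.mem_range'_1] at hk; omega)
            (min (pvSolve chars alpha f (i + 1) j memo).1
              (pvSolve chars alpha f i (j - 1) (pvSolve chars alpha f (i + 1) j memo).2).1)
            (pvSolve chars alpha f i (j - 1) (pvSolve chars alpha f (i + 1) j memo).2).2 m2
          have hE := pvEn_eq chars alpha i j (by omega)
          simp only [hl] at hE
          have hinit := hE.symm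
          rw [← v1, ← v2] at hinit
          have hval' := kv.trans hinit
          refine ⟨hval', ?_⟩
          intro p v hv
          rw [PySem.Dict.get?_insert] at hv
          by_cases hp : p = (i, j)
          · rw [if_pos hp] at hv
            injection hv with hv'
            subst hp
            exact hv'.symm.trans hval'
          · rw [if_neg hp] at hv
            exact km p v hv

-- port-B loop skeletons (named so the fold lemmas can speak about them)
def pvRowStep (chars : List Char) (alpha : List (String × Int)) (i : Nat)
    (racc : List Int × PySem.Dict (Nat × Nat) Int) (j : Nat) :
    List Int × PySem.Dict (Nat × Nat) Int :=
  let p := pvSolve chars alpha (j - i) i j racc.2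
  (racc.1 ++ [p.1], p.2)

def pvOuterStep (chars : List Char) (alpha : List (String × Int)) (n : Nat)
    (acc : List (List Int) × PySem.Dict (Nat × Nat) Int) (i : Nat) :
    List (List Int) × PySem.Dict (Nat × Nat) Int :=
  let rw := (List.range n).foldl (pvRowStep chars alpha i) ([], acc.2)
  (acc.1 ++ [rw.1], rw.2)

def pvWarmI (chars : List Char) (alpha : List (String × Int)) (n : Nat)
    (m : PySem.Dict (Nat × Nat) Int) (ii : Nat) : PySem.Dict (Nat × Nat) Int :=
  (List.range' ((n - 1 - ii) + 1) (n - ((n - 1 - ii) + 1))).foldl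
    (fun m j => (pvSolve chars alpha (j - (n - 1 - ii)) (n - 1 - ii) j m).2) m

theorem portB_unfold (sequence : String) (alpha : List (String × Int)) :
    compute_energy_matrix_alt sequence alpha =
      ((List.range sequence.toList.length).foldl
        (pvOuterStep sequence.toList alpha sequence.toList.length)
        ([], (List.range sequence.toList.length).foldl
          (pvWarmI sequence.toList alpha sequence.toList.length) PySem.Dict.empty)).1 := rfl

theorem pvInvM_empty (chars : List Char) (alpha : List (String × Int)) :
    pvInvM chars alpha PySem.Dict.empty := by
  intro p v h
  simp [PySem.Dict.get?_empty] at h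

theorem pvInvM_solve (chars : List Char) (alpha : List (String × Int)) (i j : Nat)
    {memo : PySem.Dict (Nat × Nat) Int} (h : pvInvM chars alpha memo) :
    pvInvM chars alpha (pvSolve chars alpha (j - i) i j memo).2 :=
  (pvSolve_spec chars alpha (j - i) i j memo le_rfl h).2

theorem pvInvM_warm (chars : List Char) (alpha : List (String × Int)) (n : Nat) :
    ∀ (l : List Nat) (memo : PySem.Dict (Nat × Nat) Int), pvInvM chars alpha memo →
    pvInvM chars alpha (l.foldl (pvWarmI chars alpha n) memo) := by
  intro l
  induction l with
  | nil => intro memo hm; simpa using hm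
  | cons x xs IH =>
    intro memo hm
    rw [List.foldl_cons]
    apply IH
    unfold pvWarmI
    generalize (List.range' (n - 1 - x + 1) (n - (n - 1 - x + 1))) = l2
    induction l2 generalizing memo with
    | nil => simpa using hm
    | cons y ys IH2 =>
      rw [List.foldl_cons]
      exact IH2 _ (pvInvM_solve chars alpha _ _ hm)

theorem pvRow_spec (chars : List Char) (alpha : List (String × Int)) (i : Nat) :
    ∀ (t : Nat) (s : List Int) (memo : PySem.Dict (Nat × Nat) Int), pvInvM chars alpha memo →
    ((List.range t).foldl (pvRowStep chars alpha i) (s, memo)).1 =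
      s ++ (List.range t).map (fun j => pvEn chars alpha i j) ∧
    pvInvM chars alpha ((List.range t).foldl (pvRowStep chars alpha i) (s, memo)).2 := by
  intro t
  induction t with
  | zero => intro s memo hm; simpa using hm
  | succ t IH =>
    intro s memo hm
    rw [List.range_succ, List.foldl_append, List.foldl_cons, List.foldl_nil]
    obtain ⟨h1, h2⟩ := IH s memo hm
    set P := (List.range t).foldl (pvRowStep chars alpha i) (s, memo) with hP
    constructor
    · show (pvRowStep chars alpha i P t).1 = _
      unfold pvRowStep
      dsimp only
      rw [(pvSolve_spec chars alpha (t - i) i t P.2 le_rfl h2).1, h1]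
      simp
    · exact pvInvM_solve chars alpha i t h2

theorem pvOuterFold_spec (chars : List Char) (alpha : List (String × Int)) (n : Nat) :
    ∀ (t : Nat) (s : List (List Int)) (memo : PySem.Dict (Nat × Nat) Int),
    pvInvM chars alpha memo →
    ((List.range t).foldl (pvOuterStep chars alpha n) (s, memo)).1 =
      s ++ (List.range t).map (fun i => (List.range n).map (fun j => pvEn chars alpha i j)) ∧
    pvInvM chars alpha ((List.range t).foldl (pvOuterStep chars alpha n) (s, memo)).2 := by
  intro t
  induction t with
  | zero => intro s memo hm; simpa using hm
  | succ t IH =>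
    intro s memo hm
    rw [List.range_succ, List.foldl_append, List.foldl_cons, List.foldl_nil]
    obtain ⟨h1, h2⟩ := IH s memo hm
    set P := (List.range t).foldl (pvOuterStep chars alpha n) (s, memo) with hP
    obtain ⟨r1, r2⟩ := pvRow_spec chars alpha t n [] P.2 h2
    constructor
    · show (pvOuterStep chars alpha n P t).1 = _
      unfold pvOuterStep
      dsimp only
      rw [r1, h1]
      simp
    · exact r2

theorem portB_eq_T (sequence : String) (alpha : List (String × Int)) :
    compute_energy_matrix_alt sequence alpha = pvT sequence.toList alpha := by
  rw [portB_unfold]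
  have hw := pvInvM_warm sequence.toList alpha sequence.toList.length
    (List.range sequence.toList.length) PySem.Dict.empty (pvInvM_empty _ _)
  have := (pvOuterFold_spec sequence.toList alpha sequence.toList.length
    sequence.toList.length [] _ hw).1
  rw [this]
  simp [pvT]

-- ===== VERDICT (by name: the statement is the Claim_ definition above) =====
theorem compute_energy_matrix_spec : Claim_equal_compute_energy_matrix := by
  intro sequence alpha _
  unfold Spec_compute_energy_matrix
  rw [portA_eq_T, portB_eq_T]
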